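-- pv_equiv track=rewrite | github.com/wojcikiewicz17/GAIA_phi | build_dataset.py | infer_type_from_keys
-- ===== SOURCE A (Python) =====
-- from typing import Any, Dict, Iterable, Iterator, List, Optional, Tuple
--
-- def infer_type_from_keys(keys: List[str]) -> str:
--     if any(key in {"mapping", "messages", "conversation"} for key in keys):
--         return "conversation"
--     if any("metric" in key for key in keys):
--         return "metric_event"
--     if any("dashboard" in key for key in keys):
--         return "dashboard_event"
--     if "title" in keys:
--         return "title"
--     if "user" in keys:
--         return "user"
--     return "unknown"
-- ===== SOURCE B (Python) =====
-- def infer_type_from_keys(keys):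
--     conv = metric = dash = title = user = False
--     for key in keys:
--         if key in ("mapping", "messages", "conversation"):
--             conv = True
--         if "metric" in key:
--             metric = True
--         if "dashboard" in key:
--             dash = True
--         if key == "title":
--             title = True
--         if key == "user":
--             user = True
--     if conv:
--         return "conversation"
--     if metric:
--         return "metric_event"
--     if dash:
--         return "dashboard_event"
--     if title:
--         return "title"
--     if user:
--         return "user"
--     return "unknown"
-- ===== Notes on version B (the rewrite author's own statement) =====
-- stated objective: alternative
-- what changed: Replaces A's five separate existential scans over keys by one single pass that accumulates five boolean flags, followed by a priority decision.
import Mathlib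
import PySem

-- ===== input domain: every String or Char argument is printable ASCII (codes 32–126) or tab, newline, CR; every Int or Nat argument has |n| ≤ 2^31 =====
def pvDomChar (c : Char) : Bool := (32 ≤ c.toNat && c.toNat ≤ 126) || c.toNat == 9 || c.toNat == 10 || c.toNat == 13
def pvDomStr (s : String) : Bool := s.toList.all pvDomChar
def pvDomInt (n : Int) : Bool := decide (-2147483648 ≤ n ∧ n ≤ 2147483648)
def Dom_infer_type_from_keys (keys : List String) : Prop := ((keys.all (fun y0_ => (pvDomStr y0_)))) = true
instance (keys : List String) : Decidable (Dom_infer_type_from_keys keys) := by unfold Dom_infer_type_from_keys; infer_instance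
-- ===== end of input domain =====

-- B replaces A's five separate existential scans by one flag-accumulating pass plus a priority decision (alternative decomposition, same cost).


-- ===== PORT A =====
def infer_type_from_keys (keys : List String) : String :=
  if keys.any (fun key => key == "mapping" || key == "messages" || key == "conversation") then
    "conversation"
  else if keys.any (fun key => PySem.Str.isIn "metric" key) then
    "metric_event"
  else if keys.any (fun key => PySem.Str.isIn "dashboard" key) then
    "dashboard_event"
  else if keys.contains "title" then
    "title"
  else if keys.contains "user" then
    "user"
  else
    "unknown"

-- ===== PORT B =====
-- single pass: fold accumulating the five flags, then decide by priority
def inferFlagsStep (st : Bool × Bool × Bool × Bool × Bool) (key : String) :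
    Bool × Bool × Bool × Bool × Bool :=
  (st.1 || (key == "mapping" || key == "messages" || key == "conversation"),
   st.2.1 || PySem.Str.isIn "metric" key,
   st.2.2.1 || PySem.Str.isIn "dashboard" key,
   st.2.2.2.1 || key == "title",
   st.2.2.2.2 || key == "user")

def infer_type_from_keys_alt (keys : List String) : String :=
  let st := keys.foldl inferFlagsStep (false, false, false, false, false)
  if st.1 then "conversation"
  else if st.2.1 then "metric_event"
  else if st.2.2.1 then "dashboard_event"
  else if st.2.2.2.1 then "title"
  else if st.2.2.2.2 then "user"
  else "unknown"

-- ===== PRECONDITION & SPEC =====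
def Spec_infer_type_from_keys (keys : List String) (out : String) : Prop := out = infer_type_from_keys_alt keys
instance (keys : List String) (out : String) : Decidable (Spec_infer_type_from_keys keys out) := by unfold Spec_infer_type_from_keys; infer_instance

-- ===== CLAIM (what is proved, stated in full; the proofs are below) =====
def Claim_equal_infer_type_from_keys : Prop := ∀ (keys : List String), Dom_infer_type_from_keys keys → Spec_infer_type_from_keys keys (infer_type_from_keys keys)

-- ===== LEMMAS AND PROOFS =====
theorem inferFlags_foldl (keys : List String) (st : Bool × Bool × Bool × Bool × Bool) :
    keys.foldl inferFlagsStep st =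
      (st.1 || keys.any (fun key => key == "mapping" || key == "messages" || key == "conversation"),
       st.2.1 || keys.any (fun key => PySem.Str.isIn "metric" key),
       st.2.2.1 || keys.any (fun key => PySem.Str.isIn "dashboard" key),
       st.2.2.2.1 || keys.contains "title",
       st.2.2.2.2 || keys.contains "user") := by
  induction keys generalizing st with
  | nil => simp
  | cons k ks ih =>
    simp only [List.foldl_cons, ih, inferFlagsStep, List.any_cons, List.contains_cons]
    refine Prod.ext ?_ (Prod.ext ?_ (Prod.ext ?_ (Prod.ext ?_ ?_))) <;>
      simp [Bool.or_assoc, BEq.comm]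

-- ===== VERDICT (by name: the statement is the Claim_ definition above) =====
theorem infer_type_from_keys_spec : Claim_equal_infer_type_from_keys := by
  intro keys _
  unfold Spec_infer_type_from_keys infer_type_from_keys infer_type_from_keys_alt
  simp only [inferFlags_foldl, Bool.false_or]
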